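-- pv_equiv track=rewrite | github.com/a01110946/timber_framing_generator | src/timber_framing_generator/mep/plumbing/pipe_creator.py | group_routes_by_fixture_system
-- ===== SOURCE A (Python) =====
-- from typing import Dict, List, Any, Tuple, Optional
--
-- def group_routes_by_fixture_system(routes: List[Dict[str, Any]]) -> Dict[str, List[Dict]]:
--     """
--     Group routes by fixture ID and system type.
--
--     This groups routes that should share a trunk (e.g., two sanitary
--     drains from the same sink).
--
--     Args:
--         routes: List of route dictionaries
--
--     Returns:
--         Dictionary with keys like "12345_Sanitary" -> list of routes
--     """
--     groups = {}
--
--     for route in routes: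
--         # Extract fixture ID from start_connector_id (format: "elementId_connectorIndex")
--         connector_id = route.get("start_connector_id", "")
--         parts = connector_id.split("_")
--         fixture_id = parts[0] if parts else "unknown"
--
--         system_type = route.get("system_type", "Unknown")
--         group_key = f"{fixture_id}_{system_type}"
--
--         if group_key not in groups:
--             groups[group_key] = []
--         groups[group_key].append(route)
--
--     return groups
-- ===== SOURCE B (Python) =====
-- def _group_key(route):
--     connector_id = route.get("start_connector_id", "")
--     parts = connector_id.split("_")
--     fixture_id = parts[0] if parts else "unknown"
--     system_type = route.get("system_type", "Unknown")
--     return f"{fixture_id}_{system_type}"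
--
--
-- def group_routes_by_fixture_system(routes):
--     keyed = [(_group_key(r), r) for r in routes]
--     order = list(dict.fromkeys(k for k, _ in keyed))
--     return {k: [r for kk, r in keyed if kk == k] for k in order}
-- ===== Notes on version B (the rewrite author's own statement) =====
-- stated objective: alternative
-- what changed: Replaces A's incremental dict-building scan (check membership, create empty bucket, append per route) by a two-pass decomposition: key every route once, deduplicate the keys in first-occurrence order, then materialize each group with a per-key filter over the keyed list.
import Mathlib
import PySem

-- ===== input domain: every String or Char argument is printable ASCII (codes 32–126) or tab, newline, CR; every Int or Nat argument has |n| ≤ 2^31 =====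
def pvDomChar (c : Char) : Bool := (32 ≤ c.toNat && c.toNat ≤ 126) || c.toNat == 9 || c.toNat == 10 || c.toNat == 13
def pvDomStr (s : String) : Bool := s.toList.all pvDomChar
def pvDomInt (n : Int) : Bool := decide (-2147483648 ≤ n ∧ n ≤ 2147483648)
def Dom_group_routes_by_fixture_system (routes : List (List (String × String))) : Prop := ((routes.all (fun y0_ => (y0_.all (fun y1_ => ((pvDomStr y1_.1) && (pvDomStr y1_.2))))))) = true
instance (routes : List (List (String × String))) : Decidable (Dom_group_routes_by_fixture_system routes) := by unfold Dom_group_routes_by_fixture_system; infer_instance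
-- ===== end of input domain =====

-- B replaces A's incremental dict-maintaining scan by a two-pass decomposition (key every
-- route once, dedup the keys in first-occurrence order, then collect each group by a filter);
-- objective: alternative structure, same observable result.

-- ===== PORT A =====
def group_routes_by_fixture_system (routes : List (List (String × String))) : List (String × List (List (String × String))) :=
  (routes.foldl (fun groups route =>
      let connector_id := (PySem.Dict.mk route).getD "start_connector_id" ""
      let parts := (PySem.Str.split? connector_id "_").getD []
      let fixture_id := match parts with | [] => "unknown" | p :: _ => p
      let system_type := (PySem.Dict.mk route).getD "system_type" "Unknown"
      let group_key := fixture_id ++ "_" ++ system_type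
      let groups := if groups.contains group_key then groups else groups.insert group_key []
      groups.modify group_key [] (· ++ [route]))
    PySem.Dict.empty).items

-- ===== PORT B =====
def pvGroupKey (route : List (String × String)) : String :=
  let connector_id := (PySem.Dict.mk route).getD "start_connector_id" ""
  let parts := (PySem.Str.split? connector_id "_").getD []
  let fixture_id := match parts with | [] => "unknown" | p :: _ => p
  let system_type := (PySem.Dict.mk route).getD "system_type" "Unknown"
  fixture_id ++ "_" ++ system_type

def group_routes_by_fixture_system_alt (routes : List (List (String × String))) : List (String × List (List (String × String))) :=
  let keyed := routes.map (fun r => (pvGroupKey r, r))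
  let order := PySem.List.dedup (keyed.map (·.1))
  order.map (fun k => (k, (keyed.filter (fun p => p.1 == k)).map (·.2)))

-- ===== PRECONDITION & SPEC =====
def Spec_group_routes_by_fixture_system (routes : List (List (String × String))) (out : List (String × List (List (String × String)))) : Prop := out = group_routes_by_fixture_system_alt routes
instance (routes : List (List (String × String))) (out : List (String × List (List (String × String)))) : Decidable (Spec_group_routes_by_fixture_system routes out) := by unfold Spec_group_routes_by_fixture_system; infer_instance

-- ===== CLAIM (what is proved, stated in full; the proofs are below) =====
def Claim_equal_group_routes_by_fixture_system : Prop := ∀ (routes : List (List (String × String))), Dom_group_routes_by_fixture_system routes → Spec_group_routes_by_fixture_system routes (group_routes_by_fixture_system routes)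

-- ===== LEMMAS AND PROOFS =====

-- A's "if key not in groups: groups[key] = []; groups[key].append(route)" is one modify.
theorem pv_setdefault_modify {ν : Type} (d : PySem.Dict String ν) (k : String) (d0 : ν) (f : ν → ν) :
    (if d.contains k then d else d.insert k d0).modify k d0 f = d.modify k d0 f := by
  by_cases h : d.contains k = true
  · simp [h]
  · have hg : d.getD k d0 = d0 := by
      have h2 : d.get? k = none := by
        cases hg : d.get? k with
        | none => rfl
        | some v => exact absurd (by rw [PySem.Dict.contains_eq_isSome_get?, hg]; rfl) h
      simp [PySem.Dict.getD_eq_get?_getD, h2]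
    simp [h, PySem.Dict.modify, PySem.Dict.getD_insert_self, PySem.Dict.insert_insert_self, hg]

theorem pv_foldl_eq (routes : List (List (String × String))) :
    (routes.foldl (fun groups route =>
      let connector_id := (PySem.Dict.mk route).getD "start_connector_id" ""
      let parts := (PySem.Str.split? connector_id "_").getD []
      let fixture_id := match parts with | [] => "unknown" | p :: _ => p
      let system_type := (PySem.Dict.mk route).getD "system_type" "Unknown"
      let group_key := fixture_id ++ "_" ++ system_type
      let groups := if groups.contains group_key then groups else groups.insert group_key []
      groups.modify group_key [] (· ++ [route])) PySem.Dict.empty)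
    = ((routes.map (fun r => (pvGroupKey r, r))).foldl
        (fun d p => d.modify p.1 [] (· ++ [p.2])) PySem.Dict.empty) := by
  rw [List.foldl_map]
  apply PySem.List.foldl_congr_mem
  intro d r _
  simpa [pvGroupKey] using pv_setdefault_modify d (pvGroupKey r) [] (· ++ [r])

theorem group_routes_agree (routes : List (List (String × String))) :
    group_routes_by_fixture_system routes = group_routes_by_fixture_system_alt routes := by
  unfold group_routes_by_fixture_system group_routes_by_fixture_system_alt
  rw [pv_foldl_eq]
  set keyed := routes.map (fun r => (pvGroupKey r, r)) with hkeyed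
  set d := keyed.foldl (fun d p => d.modify p.1 [] (· ++ [p.2])) PySem.Dict.empty with hd
  have hnd : d.keys.Nodup := by
    rw [hd]
    exact PySem.Dict.nodup_keys_foldl_modify_key keyed (·.1) [] (fun _ p => (· ++ [p.2]))
      PySem.Dict.empty (by simp)
  rw [PySem.Dict.items_eq_map_keys d hnd []]
  have hkeys : d.keys = PySem.List.dedup (keyed.map (·.1)) := by
    rw [hd, PySem.Dict.keys_foldl_modify_key]
    simp [PySem.List.dedup_eq_ofList, PySem.Dict.keys_empty, PySem.Set.update_nil_left]
  rw [hkeys]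
  apply List.map_congr_left
  intro k _
  have := PySem.Dict.getD_foldl_modify_append keyed PySem.Dict.empty k
  simp only [hd, this, PySem.Dict.getD_empty, List.nil_append]

-- ===== VERDICT (by name: the statement is the Claim_ definition above) =====
theorem group_routes_by_fixture_system_spec : Claim_equal_group_routes_by_fixture_system := by
  intro routes _
  unfold Spec_group_routes_by_fixture_system
  exact group_routes_agree routes
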